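-- pv_equiv track=rewrite | github.com/AMDResearch/omniprobe | tools/codeobj/inspect_code_object.py | split_list_items
-- ===== SOURCE A (Python) =====
-- def split_list_items(lines: list[str], parent_indent: int) -> list[list[str]]:
--     items: list[list[str]] = []
--     current: list[str] = []
--     item_indent: int | None = None
--     for line in lines:
--         stripped = line.strip()
--         if not stripped:
--             if current:
--                 current.append(line)
--             continue
--         indent = len(line) - len(line.lstrip(" "))
--         if stripped.startswith("- ") and indent > parent_indent and (
--             item_indent is None or indent == item_indent
--         ):
--             if current:
--                 items.append(current)
--             current = [line]
--             item_indent = indent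
--             continue
--         if current and item_indent is not None and indent >= item_indent:
--             current.append(line)
--     if current:
--         items.append(current)
--     return items
-- ===== SOURCE B (Python) =====
-- def _indent(line):
--     return len(line) - len(line.lstrip(" "))
--
--
-- def _is_start(line, item_indent):
--     return line.strip().startswith("- ") and _indent(line) == item_indent
--
--
-- def _keep(line, item_indent):
--     return not line.strip() or _indent(line) >= item_indent
--
--
-- def _find_item_indent(lines, parent_indent):
--     for line in lines:
--         if line.strip().startswith("- ") and _indent(line) > parent_indent:
--             return _indent(line)
--     return None
--
--
-- def _split(rest, item_indent):
--     # rest[0] is an item-start line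
--     head, tail = rest[0], rest[1:]
--     body = []
--     while tail and not _is_start(tail[0], item_indent):
--         if _keep(tail[0], item_indent):
--             body.append(tail[0])
--         tail = tail[1:]
--     out = [[head] + body]
--     if tail:
--         out.extend(_split(tail, item_indent))
--     return out
--
--
-- def split_list_items(lines: list[str], parent_indent: int) -> list[list[str]]:
--     item_indent = _find_item_indent(lines, parent_indent)
--     if item_indent is None:
--         return []
--     while not _is_start(lines[0], item_indent):
--         lines = lines[1:]
--     return _split(lines, item_indent)
-- ===== Notes on version B (the rewrite author's own statement) =====
-- stated objective: alternative
-- what changed: A threads a single accumulator loop with mutable items/current/item_indent state; B first scans once to find the frozen item indent, drops the prefix before the first item start, and then recursively cuts the tail into segments at start lines, filtering each segment's body.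
import Mathlib
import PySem

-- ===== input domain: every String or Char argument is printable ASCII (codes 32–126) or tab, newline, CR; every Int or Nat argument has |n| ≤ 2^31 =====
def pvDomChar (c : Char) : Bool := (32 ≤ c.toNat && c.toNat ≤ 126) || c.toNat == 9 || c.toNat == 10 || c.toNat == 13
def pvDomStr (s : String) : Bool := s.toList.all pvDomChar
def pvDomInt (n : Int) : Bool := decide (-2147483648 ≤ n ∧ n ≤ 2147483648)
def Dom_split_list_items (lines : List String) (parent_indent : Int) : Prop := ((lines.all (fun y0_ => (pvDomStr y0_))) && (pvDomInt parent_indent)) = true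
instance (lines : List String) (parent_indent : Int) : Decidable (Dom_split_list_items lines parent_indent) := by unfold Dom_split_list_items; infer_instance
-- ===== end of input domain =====

-- B re-implements the split as: find the frozen item indent by a first scan, drop the prefix
-- before the first item start, then recursively cut the tail into segments at start lines,
-- filtering each segment — a different decomposition (alternative), not claimed faster.


-- shared leaf helper: len(line) - len(line.lstrip(" "))
-- (exact: lstrip(" ") removes exactly the run of leading ' ' characters)
def pvIndent (line : String) : Int :=
  PySem.Str.len line - ((line.toList.dropWhile (· == ' ')).length : Int)

-- ===== PORT A =====
-- the loop body of A, state = (items, current, item_indent)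
def pvAstep (parent_indent : Int)
    (st : List (List String) × List String × Option Int) (line : String) :
    List (List String) × List String × Option Int :=
  let stripped := PySem.Str.strip line
  if stripped == "" then
    (st.1, if st.2.1.isEmpty then st.2.1 else st.2.1 ++ [line], st.2.2)
  else
    let ind := pvIndent line
    if PySem.Str.startswith stripped "- " && decide (ind > parent_indent) &&
        (st.2.2.isNone || st.2.2 == some ind) then
      ((if st.2.1.isEmpty then st.1 else st.1 ++ [st.2.1]), [line], some ind)
    else
      match st.2.2 with
      | some ii =>
          if !st.2.1.isEmpty && decide (ind ≥ ii) then (st.1, st.2.1 ++ [line], st.2.2)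
          else st
      | none => st

def split_list_items (lines : List String) (parent_indent : Int) : List (List String) :=
  let st := lines.foldl (pvAstep parent_indent) ([], [], none)
  if st.2.1.isEmpty then st.1 else st.1 ++ [st.2.1]

-- ===== PORT B =====
def pvBisStart (item_indent : Int) (line : String) : Bool :=
  PySem.Str.startswith (PySem.Str.strip line) "- " && pvIndent line == item_indent

def pvBkeep (item_indent : Int) (line : String) : Bool :=
  PySem.Str.strip line == "" || decide (pvIndent line ≥ item_indent)

def pvBfindIndent (parent_indent : Int) : List String → Option Int
  | [] => none
  | line :: rest =>
      if PySem.Str.startswith (PySem.Str.strip line) "- " &&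
          decide (pvIndent line > parent_indent) then some (pvIndent line)
      else pvBfindIndent parent_indent rest

-- _split of Source B; the extra Nat argument is pure fuel making the recursion structural
-- (never exhausted when fuel ≥ list length)
def pvBsplitF (item_indent : Int) : Nat → List String → List (List String)
  | _, [] => []
  | 0, _ :: _ => []
  | fuel + 1, head :: tail =>
      let body := (tail.takeWhile (fun l => !pvBisStart item_indent l)).filter (pvBkeep item_indent)
      let tail' := tail.dropWhile (fun l => !pvBisStart item_indent l)
      (head :: body) :: (if tail'.isEmpty then [] else pvBsplitF item_indent fuel tail')

def split_list_items_alt (lines : List String) (parent_indent : Int) : List (List String) :=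
  match pvBfindIndent parent_indent lines with
  | none => []
  | some ii =>
      let tail := lines.dropWhile (fun l => !pvBisStart ii l)
      pvBsplitF ii tail.length tail

-- ===== PRECONDITION & SPEC =====
def Spec_split_list_items (lines : List String) (parent_indent : Int) (out : List (List String)) : Prop := out = split_list_items_alt lines parent_indent
instance (lines : List String) (parent_indent : Int) (out : List (List String)) : Decidable (Spec_split_list_items lines parent_indent out) := by unfold Spec_split_list_items; infer_instance

-- ===== CLAIM (what is proved, stated in full; the proofs are below) =====
def Claim_equal_split_list_items : Prop := ∀ (lines : List String) (parent_indent : Int), Dom_split_list_items lines parent_indent → Spec_split_list_items lines parent_indent (split_list_items lines parent_indent)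

-- ===== LEMMAS AND PROOFS =====

-- A's final flush
def pvFinish (st : List (List String) × List String × Option Int) : List (List String) :=
  if st.2.1.isEmpty then st.1 else st.1 ++ [st.2.1]

-- A's loop after the first item start, reorganised per line (proof-only helper)
def pvFrom (ii : Int) (cur : List String) : List String → List (List String)
  | [] => [cur]
  | l :: rest =>
      if pvBisStart ii l then cur :: pvFrom ii [l] rest
      else if pvBkeep ii l then pvFrom ii (cur ++ [l]) rest
      else pvFrom ii cur rest

theorem pv_blank_not_dash (l : String) (h : PySem.Str.strip l = "") :
    PySem.Str.startswith (PySem.Str.strip l) "- " = false := by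
  rw [h]; decide

theorem pv_dash_not_blank (l : String)
    (h : PySem.Str.startswith (PySem.Str.strip l) "- " = true) :
    (PySem.Str.strip l == "") = false := by
  rcases hb : (PySem.Str.strip l == "") with _ | _
  · rfl
  · rw [pv_blank_not_dash l (by simpa using hb)] at h; cases h

theorem pvBisStart_true (ii : Int) (l : String)
    (hd : PySem.Str.startswith (PySem.Str.strip l) "- " = true) (h : pvIndent l = ii) :
    pvBisStart ii l = true := by
  unfold pvBisStart; rw [hd, h]; simp

theorem pvBisStart_false_of_not_dash (ii : Int) (l : String)
    (hd : PySem.Str.startswith (PySem.Str.strip l) "- " = false) :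
    pvBisStart ii l = false := by
  unfold pvBisStart; rw [hd]; rfl

theorem pvBisStart_false_of_ne (ii : Int) (l : String) (h : pvIndent l ≠ ii) :
    pvBisStart ii l = false := by
  unfold pvBisStart
  cases hx : PySem.Str.startswith (PySem.Str.strip l) "- " <;> simp [h]

theorem pv_find_pos (p ii : Int) :
    ∀ lines : List String, pvBfindIndent p lines = some ii → p < ii := by
  intro lines
  induction lines with
  | nil => intro h; cases h
  | cons l ls ih =>
      intro h
      by_cases hc : (PySem.Str.startswith (PySem.Str.strip l) "- " &&
          decide (pvIndent l > p)) = true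
      · simp only [pvBfindIndent, hc, if_true, Option.some.injEq] at h
        have := (Bool.and_eq_true _ _).mp hc
        have h2 := of_decide_eq_true this.2
        omega
      · rw [pvBfindIndent, if_neg hc] at h
        exact ih h

theorem pv_phase2 (p ii : Int) (hii : p < ii) :
    ∀ (rest : List String) (items : List (List String)) (cur : List String), cur ≠ [] →
      pvFinish (rest.foldl (pvAstep p) (items, cur, some ii)) = items ++ pvFrom ii cur rest := by
  intro rest
  induction rest with
  | nil =>
      intro items cur hcur
      simp [pvFinish, pvFrom, List.isEmpty_eq_false_iff.mpr hcur]
  | cons l rest ih =>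
      intro items cur hcur
      rcases hb : (PySem.Str.strip l == "") with _ | _
      · -- non-blank line
        by_cases hEq : pvIndent l = ii
        · subst hEq
          by_cases hd : PySem.Str.startswith (PySem.Str.strip l) "- " = true
          · -- item start
            have hstart : pvBisStart (pvIndent l) l = true := pvBisStart_true _ _ hd rfl
            have hcond : (PySem.Str.startswith (PySem.Str.strip l) "- " &&
                decide (pvIndent l > p) &&
                ((some (pvIndent l)).isNone || some (pvIndent l) == some (pvIndent l))) = true := by
              rw [hd]; simp; omega
            simp only [List.foldl_cons, pvAstep, hb, Bool.false_eq_true, if_false, hcond,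
              if_true, List.isEmpty_eq_false_iff.mpr hcur]
            rw [ih (items ++ [cur]) [l] (by simp)]
            simp [pvFrom, hstart]
          · -- dash test fails, indent equals item_indent (≥ it): appended
            have hd' : PySem.Str.startswith (PySem.Str.strip l) "- " = false := by
              simpa using hd
            have hstart : pvBisStart (pvIndent l) l = false :=
              pvBisStart_false_of_not_dash _ _ hd'
            have hkeep : pvBkeep (pvIndent l) l = true := by simp [pvBkeep]
            simp only [List.foldl_cons, pvAstep, hb, Bool.false_eq_true, if_false, hd',
              Bool.false_and, List.isEmpty_eq_false_iff.mpr hcur, Bool.not_false,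
              Bool.true_and, decide_eq_true_eq]
            rw [if_pos (by omega)]
            rw [ih items (cur ++ [l]) (by simp)]
            simp [pvFrom, hstart, hkeep]
        · -- indent ≠ ii : never a start; kept iff indent ≥ ii
          have hstart : pvBisStart ii l = false := pvBisStart_false_of_ne ii l hEq
          have hcond : (PySem.Str.startswith (PySem.Str.strip l) "- " &&
              decide (pvIndent l > p) &&
              ((some ii).isNone || some ii == some (pvIndent l))) = false := by
            rcases hx : PySem.Str.startswith (PySem.Str.strip l) "- " with _ | _
            · rfl
            · simp; intro _ h; exact hEq h.symm
          by_cases hge : ii ≤ pvIndent l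
          · have hkeep : pvBkeep ii l = true := by simp [pvBkeep]; omega
            simp only [List.foldl_cons, pvAstep, hb, Bool.false_eq_true, if_false, hcond,
              List.isEmpty_eq_false_iff.mpr hcur, Bool.not_false, Bool.true_and,
              decide_eq_true_eq]
            rw [if_pos hge]
            rw [ih items (cur ++ [l]) (by simp)]
            simp [pvFrom, hstart, hkeep]
          · have hkeep : pvBkeep ii l = false := by
              simp [pvBkeep, hb]; omega
            simp only [List.foldl_cons, pvAstep, hb, Bool.false_eq_true, if_false, hcond,
              List.isEmpty_eq_false_iff.mpr hcur, Bool.not_false, Bool.true_and,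
              decide_eq_true_eq]
            rw [if_neg hge]
            rw [ih items cur hcur]
            simp [pvFrom, hstart, hkeep]
      · -- blank line: appended (current nonempty), never a start
        have hb' : PySem.Str.strip l = "" := by simpa using hb
        have hstart : pvBisStart ii l = false :=
          pvBisStart_false_of_not_dash ii l (pv_blank_not_dash l hb')
        have hkeep : pvBkeep ii l = true := by simp [pvBkeep, hb]
        simp only [List.foldl_cons, pvAstep, hb, if_true,
          List.isEmpty_eq_false_iff.mpr hcur, Bool.false_eq_true, if_false]
        rw [ih items (cur ++ [l]) (by simp)]
        simp [pvFrom, hstart, hkeep]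

theorem pvBsplitF_congr (ii : Int) :
    ∀ (f g : Nat) (xs : List String), xs.length ≤ f → xs.length ≤ g →
      pvBsplitF ii f xs = pvBsplitF ii g xs := by
  intro f
  induction f with
  | zero =>
      intro g xs hf _
      have : xs = [] := List.length_eq_zero_iff.mp (Nat.le_zero.mp hf)
      subst this
      cases g <;> rfl
  | succ f ih =>
      intro g xs hf hg
      cases xs with
      | nil => cases g <;> rfl
      | cons h t =>
          cases g with
          | zero => simp at hg
          | succ g =>
              simp only [pvBsplitF]
              congr 1
              by_cases he : (t.dropWhile (fun l => !pvBisStart ii l)).isEmpty = true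
              · simp [he]
              · simp only [he, Bool.false_eq_true, if_false]
                have hlen := List.length_dropWhile_le (fun l => !pvBisStart ii l) t
                simp only [List.length_cons] at hf hg
                exact ih g _ (by omega) (by omega)

theorem pvFrom_eq (ii : Int) :
    ∀ (rest : List String) (cur : List String),
      pvFrom ii cur rest =
        (cur ++ (rest.takeWhile (fun l => !pvBisStart ii l)).filter (pvBkeep ii)) ::
        (if (rest.dropWhile (fun l => !pvBisStart ii l)).isEmpty then []
         else pvBsplitF ii (rest.dropWhile (fun l => !pvBisStart ii l)).length
                (rest.dropWhile (fun l => !pvBisStart ii l))) := by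
  intro rest
  induction rest with
  | nil => intro cur; simp [pvFrom]
  | cons l rest ih =>
      intro cur
      rcases hs : pvBisStart ii l with _ | _
      · rcases hk : pvBkeep ii l with _ | _
        · -- not a start, dropped
          simp only [pvFrom, hs, Bool.false_eq_true, if_false, hk]
          rw [ih cur]
          simp [hs, hk]
        · -- not a start, kept
          simp only [pvFrom, hs, Bool.false_eq_true, if_false, hk, if_true]
          rw [ih (cur ++ [l])]
          simp [hs, hk]
      · -- a start: segment boundary
        simp only [pvFrom, hs, if_true]
        rw [ih [l]]
        have hdw : (l :: rest).dropWhile (fun l => !pvBisStart ii l) = l :: rest := by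
          simp [hs]
        have htw : (l :: rest).takeWhile (fun l => !pvBisStart ii l) = [] := by
          simp [hs]
        rw [hdw, htw]
        simp only [List.filter_nil, List.append_nil, List.isEmpty_cons, Bool.false_eq_true,
          if_false, List.length_cons, pvBsplitF]
        congr 2
        by_cases he : (rest.dropWhile (fun l => !pvBisStart ii l)).isEmpty = true
        · simp [he]
        · simp only [he, Bool.false_eq_true, if_false]
          have hlen := List.length_dropWhile_le (fun l => !pvBisStart ii l) rest
          exact pvBsplitF_congr ii _ _ _ (le_refl _) (by omega)

theorem pv_split_eq_finish (lines : List String) (parent_indent : Int) :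
    split_list_items lines parent_indent =
      pvFinish (lines.foldl (pvAstep parent_indent) ([], [], none)) := rfl

set_option maxHeartbeats 1000000 in
theorem split_list_items_main (lines : List String) (parent_indent : Int) :
    split_list_items lines parent_indent = split_list_items_alt lines parent_indent := by
  induction lines with
  | nil => rfl
  | cons l ls ih =>
      by_cases hsp : (PySem.Str.startswith (PySem.Str.strip l) "- " &&
          decide (pvIndent l > parent_indent)) = true
      · -- l is the first qualifying line: it freezes item_indent and is the first start
        obtain ⟨hd, hgt⟩ := (Bool.and_eq_true _ _).mp hsp
        have hgt' : parent_indent < pvIndent l := of_decide_eq_true hgt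
        have hb : (PySem.Str.strip l == "") = false := pv_dash_not_blank l hd
        have hstart : pvBisStart (pvIndent l) l = true := pvBisStart_true _ _ hd rfl
        have hfind : pvBfindIndent parent_indent (l :: ls) = some (pvIndent l) := by
          unfold pvBfindIndent; rw [hsp]; rfl
        have hcond : (PySem.Str.startswith (PySem.Str.strip l) "- " &&
            decide (pvIndent l > parent_indent) &&
            ((none : Option Int).isNone || (none : Option Int) == some (pvIndent l))) = true := by
          rw [hd]; simp; omega
        have hA : split_list_items (l :: ls) parent_indent =
            pvFinish (ls.foldl (pvAstep parent_indent) ([], [l], some (pvIndent l))) := by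
          rw [pv_split_eq_finish]
          simp only [List.foldl_cons, pvAstep, hb, Bool.false_eq_true, if_false, hcond,
            if_true, List.isEmpty_nil]
        rw [hA, pv_phase2 parent_indent (pvIndent l) hgt' ls [] [l] (by simp)]
        rw [pvFrom_eq]
        show _ = split_list_items_alt (l :: ls) parent_indent
        unfold split_list_items_alt
        rw [hfind]
        have hdw : (l :: ls).dropWhile (fun x => !pvBisStart (pvIndent l) x) = l :: ls := by
          simp [hstart]
        simp only [hdw, List.length_cons, pvBsplitF, List.nil_append, List.cons_append]
        congr 2
        have hlen := List.length_dropWhile_le (fun x => !pvBisStart (pvIndent l) x) ls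
        exact pvBsplitF_congr _ _ _ _ (le_refl _) (by omega)
      · -- l is dropped before the first start; both sides ignore it
        have hAstep : pvAstep parent_indent ([], [], none) l = ([], [], none) := by
          rcases hb : (PySem.Str.strip l == "") with _ | _
          · have hcond : (PySem.Str.startswith (PySem.Str.strip l) "- " &&
                decide (pvIndent l > parent_indent) &&
                ((none : Option Int).isNone || (none : Option Int) == some (pvIndent l))) = false := by
              rw [Bool.eq_false_iff.mpr hsp]
              rfl
            simp only [pvAstep, hb, Bool.false_eq_true, if_false, hcond, List.isEmpty_nil]
          · simp [pvAstep, hb]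
        have hA : split_list_items (l :: ls) parent_indent = split_list_items ls parent_indent := by
          rw [pv_split_eq_finish, pv_split_eq_finish, List.foldl_cons, hAstep]
        rw [hA, ih]
        unfold split_list_items_alt
        have hfind : pvBfindIndent parent_indent (l :: ls) =
            pvBfindIndent parent_indent ls := by
          simp only [pvBfindIndent, Bool.eq_false_iff.mpr hsp, Bool.false_eq_true, if_false]
        rw [hfind]
        cases hf : pvBfindIndent parent_indent ls with
        | none => rfl
        | some ii =>
            have hii : parent_indent < ii := pv_find_pos parent_indent ii ls hf
            have hstart : pvBisStart ii l = false := by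
              rcases h : pvBisStart ii l with _ | _
              · rfl
              · obtain ⟨h1, h2⟩ := (Bool.and_eq_true _ _).mp h
                have he : pvIndent l = ii := by simpa using h2
                exfalso
                apply hsp
                rw [h1]
                simp
                omega
            have hdw : (l :: ls).dropWhile (fun x => !pvBisStart ii x) =
                ls.dropWhile (fun x => !pvBisStart ii x) := by
              simp [hstart]
            simp only [hdw]

-- ===== VERDICT (by name: the statement is the Claim_ definition above) =====
theorem split_list_items_spec : Claim_equal_split_list_items := by
  intro lines parent_indent _
  unfold Spec_split_list_items
  exact split_list_items_main lines parent_indent
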